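-- pv_equiv track=rewrite | github.com/Jungle173668/SDG0_partner_finder_system | eval/rag_eval.py | _results_table
-- ===== SOURCE A (Python) =====
-- def _results_table(
--     rows: list[tuple[str, str | None, str | None, str | None, str | None]],
--     has_website: bool,
--     has_pipeline: bool,
-- ) -> list[str]:
--     """
--     Render a standardised results table.
--     Each row is (label, website_val, bm25_val, semantic_val, pipeline_val).
--     Pass None for a cell to show '—'. Columns suppressed when not available.
--     """
--     cols = ["Metric"]
--     if has_website:
--         cols.append("Website (MySQL)")
--     cols.append("BM25")
--     cols.append("Raw Semantic")
--     if has_pipeline: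
--         cols.append("Full Pipeline (HyDE)")
--     hdr = "| " + " | ".join(cols) + " |"
--     sep = "| " + " | ".join(["---"] * len(cols)) + " |"
--     out = [hdr, sep]
--     for (label, wp, bm25, sem, pipe) in rows:
--         cells = [label]
--         if has_website:
--             cells.append(wp if wp is not None else "—")
--         cells.append(bm25 if bm25 is not None else "—")
--         cells.append(sem if sem is not None else "—")
--         if has_pipeline:
--             cells.append(pipe if pipe is not None else "—")
--         out.append("| " + " | ".join(cells) + " |")
--     return out
-- ===== SOURCE B (Python) =====
-- def _results_table(
--     rows: list[tuple[str, str | None, str | None, str | None, str | None]],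
--     has_website: bool,
--     has_pipeline: bool,
-- ) -> list[str]:
--     val = lambda i: (lambda row: row[i] if row[i] is not None else "—")
--     specs = [("Metric", lambda row: row[0])]
--     if has_website:
--         specs.append(("Website (MySQL)", val(1)))
--     specs.append(("BM25", val(2)))
--     specs.append(("Raw Semantic", val(3)))
--     if has_pipeline:
--         specs.append(("Full Pipeline (HyDE)", val(4)))
--     line = lambda cells: "| " + " | ".join(cells) + " |"
--     return [line([t for t, _ in specs]),
--             line(["---"] * len(specs))] + [
--             line([f(row) for _, f in specs]) for row in rows]
-- ===== Notes on version B (the rewrite author's own statement) =====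
-- stated objective: simpler
-- what changed: Replaces the repeated inline column branches (for the header and again inside the row loop) with one up-front list of column specs (title, extractor); header, separator and every data row are then produced by the same uniform join over that list.
import Mathlib
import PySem

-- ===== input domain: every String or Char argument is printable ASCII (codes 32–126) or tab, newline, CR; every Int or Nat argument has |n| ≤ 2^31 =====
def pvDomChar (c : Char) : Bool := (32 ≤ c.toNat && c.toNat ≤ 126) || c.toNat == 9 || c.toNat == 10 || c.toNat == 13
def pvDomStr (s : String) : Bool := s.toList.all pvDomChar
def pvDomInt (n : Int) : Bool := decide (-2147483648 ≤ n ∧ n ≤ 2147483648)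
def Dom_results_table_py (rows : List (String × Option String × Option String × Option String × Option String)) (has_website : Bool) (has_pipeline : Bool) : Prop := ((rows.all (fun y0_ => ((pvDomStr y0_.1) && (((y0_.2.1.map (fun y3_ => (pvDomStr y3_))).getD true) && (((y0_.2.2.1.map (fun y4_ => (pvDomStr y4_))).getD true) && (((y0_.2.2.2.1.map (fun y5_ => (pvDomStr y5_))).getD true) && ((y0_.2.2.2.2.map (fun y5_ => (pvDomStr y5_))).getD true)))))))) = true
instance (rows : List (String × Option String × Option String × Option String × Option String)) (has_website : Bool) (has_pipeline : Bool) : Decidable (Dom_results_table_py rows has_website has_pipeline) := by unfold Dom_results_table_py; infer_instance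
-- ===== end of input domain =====

-- ===== PORT A =====
-- Literal port of A: build cols with conditional appends, then fold over rows,
-- rebuilding the cell list with inline branches for each row.
def results_table_py (rows : List (String × Option String × Option String × Option String × Option String)) (has_website : Bool) (has_pipeline : Bool) : List String :=
  let cols : List String := ["Metric"]
  let cols := if has_website then cols ++ ["Website (MySQL)"] else cols
  let cols := cols ++ ["BM25"]
  let cols := cols ++ ["Raw Semantic"]
  let cols := if has_pipeline then cols ++ ["Full Pipeline (HyDE)"] else cols
  let hdr := "| " ++ PySem.Str.join " | " cols ++ " |"
  let sep := "| " ++ PySem.Str.join " | " (List.replicate cols.length "---") ++ " |"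
  rows.foldl (fun out r =>
    match r with
    | (label, wp, bm25, sem, pipe) =>
      let cells : List String := [label]
      let cells := if has_website then cells ++ [match wp with | some v => v | none => "—"] else cells
      let cells := cells ++ [match bm25 with | some v => v | none => "—"]
      let cells := cells ++ [match sem with | some v => v | none => "—"]
      let cells := if has_pipeline then cells ++ [match pipe with | some v => v | none => "—"] else cells
      out ++ ["| " ++ PySem.Str.join " | " cells ++ " |"]) [hdr, sep]

-- ===== PORT B =====
-- B: one up-front table of column specs (title, extractor); every line is then
-- produced by the same uniform join.
def pvCellB : Option String → String
  | some v => v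
  | none => "—"

def results_table_py_alt (rows : List (String × Option String × Option String × Option String × Option String)) (has_website : Bool) (has_pipeline : Bool) : List String :=
  let specs : List (String × ((String × Option String × Option String × Option String × Option String) → String)) :=
    [("Metric", fun r => r.1)]
  let specs := if has_website then specs ++ [("Website (MySQL)", fun r => pvCellB r.2.1)] else specs
  let specs := specs ++ [("BM25", fun r => pvCellB r.2.2.1), ("Raw Semantic", fun r => pvCellB r.2.2.2.1)]
  let specs := if has_pipeline then specs ++ [("Full Pipeline (HyDE)", fun r => pvCellB r.2.2.2.2)] else specs
  let line : List String → String := fun cells => "| " ++ PySem.Str.join " | " cells ++ " |"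
  [line (specs.map (fun s => s.1)), line (List.replicate specs.length "---")]
    ++ rows.map (fun r => line (specs.map (fun s => s.2 r)))

-- ===== PRECONDITION & SPEC =====
def Spec_results_table_py (rows : List (String × Option String × Option String × Option String × Option String)) (has_website : Bool) (has_pipeline : Bool) (out : List String) : Prop := out = results_table_py_alt rows has_website has_pipeline
instance (rows : List (String × Option String × Option String × Option String × Option String)) (has_website : Bool) (has_pipeline : Bool) (out : List String) : Decidable (Spec_results_table_py rows has_website has_pipeline out) := by unfold Spec_results_table_py; infer_instance

-- ===== CLAIM (what is proved, stated in full; the proofs are below) =====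
def Claim_equal_results_table_py : Prop := ∀ (rows : List (String × Option String × Option String × Option String × Option String)) (has_website : Bool) (has_pipeline : Bool), Dom_results_table_py rows has_website has_pipeline → Spec_results_table_py rows has_website has_pipeline (results_table_py rows has_website has_pipeline)

-- ===== LEMMAS AND PROOFS =====
theorem pv_flatten_map_singleton {α β : Type} (f : α → β) (l : List α) :
    (l.map (fun x => [f x])).flatten = l.map f := by
  induction l with
  | nil => rfl
  | cons x xs ih => simp [ih]

-- ===== VERDICT (by name: the statement is the Claim_ definition above) =====
theorem results_table_py_spec : Claim_equal_results_table_py := by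
  intro rows hw hp _
  unfold Spec_results_table_py results_table_py results_table_py_alt
  cases hw <;> cases hp <;> simp [pvCellB, pv_flatten_map_singleton]
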